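-- pv_equiv track=rewrite | github.com/Dickkens/Sber-test-work | SBER_1.py | min_max_distance
-- ===== SOURCE A (Python) =====
-- def min_max_distance(n, k, L):
--     def can_place(d):
--         count = 0
--         for length in L:
--             count += (length - 1) // d
--         return count <= k
--
--     left, right = 1, max(L)
--
--     while left < right:
--         mid = (left + right) // 2
--         if can_place(mid):
--             right = mid
--         else:
--             left = mid + 1
--
--     result = []
--     for length in L:
--         parts = max(1, (length + left - 1) // left)
--         for _ in range(parts - 1):
--             result.append(length // parts)
--         result.append(length - (length // parts) * (parts - 1))
--
--     return result
-- ===== SOURCE B (Python) =====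
-- def min_max_distance(n, k, L):
--     def can(d):
--         return sum((length - 1) // d for length in L) <= k
--
--     def bisect(lo, hi):
--         if lo >= hi:
--             return lo
--         mid = (lo + hi) // 2
--         return bisect(lo, mid) if can(mid) else bisect(mid + 1, hi)
--
--     left = bisect(1, max(L))
--
--     def chunk(length):
--         parts = max(1, (length + left - 1) // left)
--         q, r = divmod(length, parts)
--         return [q] * (parts - 1) + [q + r]
--
--     return [x for length in L for x in chunk(length)]
-- ===== Notes on version B (the rewrite author's own statement) =====
-- stated objective: simpler
-- what changed: The imperative while-loop bisection becomes a small recursive bisect helper over the same interval (the exact bisection must be kept because can_place is not monotone for non-positive lengths), can_place becomes a one-line sum(), and the nested append loops of the reconstruction are replaced by a per-length chunk built with divmod and list repetition ([q]*(parts-1) + [q+r]) flattened by a comprehension.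
import Mathlib
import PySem

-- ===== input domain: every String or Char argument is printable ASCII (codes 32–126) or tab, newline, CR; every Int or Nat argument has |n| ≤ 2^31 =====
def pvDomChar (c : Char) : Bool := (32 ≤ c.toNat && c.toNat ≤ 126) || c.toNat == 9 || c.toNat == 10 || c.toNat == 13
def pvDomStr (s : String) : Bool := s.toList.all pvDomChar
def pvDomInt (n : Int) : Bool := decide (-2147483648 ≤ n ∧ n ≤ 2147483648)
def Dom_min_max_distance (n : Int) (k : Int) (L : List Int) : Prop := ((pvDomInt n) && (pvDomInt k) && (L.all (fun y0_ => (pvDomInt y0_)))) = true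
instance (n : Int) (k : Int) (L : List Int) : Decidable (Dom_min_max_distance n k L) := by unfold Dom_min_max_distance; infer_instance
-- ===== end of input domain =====

-- B replaces A's imperative while-loop bisection by a recursive bisect helper and the nested
-- append loops of the reconstruction by divmod-based chunks flattened with a comprehension
-- (objective: simpler); the exact bisection is kept because can_place need not be monotone.

-- ===== PORT A =====
-- can_place(d) of A: accumulator loop over L
def pvCanA (k d : Int) (L : List Int) : Bool :=
  decide ((L.foldl (fun count length => count + PySem.Int.floordiv (length - 1) d) 0) ≤ k)

-- A's 'while left < right' bisection loop, state (left, right)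
def pvLoopA (k : Int) (L : List Int) (left right : Int) : Int :=
  if _h : left < right then
    let mid := PySem.Int.floordiv (left + right) 2
    if pvCanA k mid L then pvLoopA k L left mid else pvLoopA k L (mid + 1) right
  else left
termination_by (right - left).toNat
decreasing_by
  all_goals
    have hb := PySem.Int.floordiv_two_mid_bounds (le_of_lt _h)
    have h2 : PySem.Int.floordiv (left + right) 2 < right := by
      rw [PySem.Int.floordiv_eq_ediv_of_pos (by omega)]; omega
    simp only [mid] at *
    omega

def min_max_distance (n : Int) (k : Int) (L : List Int) : List Int :=
  let right := (PySem.List.max? L (fun x => x)).getD 0   -- max(L); ValueError on [] excluded by Pre_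
  let left := pvLoopA k L 1 right
  L.foldl (fun result length =>
    let parts := max 1 (PySem.Int.floordiv (length + left - 1) left)
    let result := (PySem.List.pyRange 0 (parts - 1) 1).foldl
      (fun r _ => r ++ [PySem.Int.floordiv length parts]) result
    result ++ [length - (PySem.Int.floordiv length parts) * (parts - 1)]) []

-- ===== PORT B =====
-- can(d) of B: sum of a mapped generator
def pvCanB (k d : Int) (L : List Int) : Bool :=
  decide ((L.map (fun length => PySem.Int.floordiv (length - 1) d)).sum ≤ k)

-- B's recursive bisect helper
def pvBisectB (k : Int) (L : List Int) (lo hi : Int) : Int :=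
  if _h : lo ≥ hi then lo
  else
    let mid := PySem.Int.floordiv (lo + hi) 2
    if pvCanB k mid L then pvBisectB k L lo mid else pvBisectB k L (mid + 1) hi
termination_by (hi - lo).toNat
decreasing_by
  all_goals
    have hb := PySem.Int.floordiv_two_mid_bounds (le_of_lt (by omega : lo < hi))
    have h2 : PySem.Int.floordiv (lo + hi) 2 < hi := by
      rw [PySem.Int.floordiv_eq_ediv_of_pos (by omega)]; omega
    simp only [mid] at *
    omega

-- B's chunk(length): [q]*(parts-1) + [q+r] with q, r = divmod(length, parts)
def pvChunkB (left length : Int) : List Int :=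
  let parts := max 1 (PySem.Int.floordiv (length + left - 1) left)
  let qr := (PySem.Int.divmod? length parts).getD (0, 0)   -- parts ≥ 1, so never none
  PySem.List.pyRepeat [qr.1] (parts - 1) ++ [qr.1 + qr.2]

def min_max_distance_alt (n : Int) (k : Int) (L : List Int) : List Int :=
  let left := pvBisectB k L 1 ((PySem.List.max? L (fun x => x)).getD 0)
  L.flatMap (pvChunkB left)

-- ===== PRECONDITION & SPEC =====
-- Pre_ excludes only the empty list, on which Python's max(L) raises ValueError (in A and in B alike).
def Pre_min_max_distance (n : Int) (k : Int) (L : List Int) : Prop := L ≠ []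
instance (n : Int) (k : Int) (L : List Int) : Decidable (Pre_min_max_distance n k L) := by
  unfold Pre_min_max_distance; infer_instance
def pvWitness_min_max_distance : Int × Int × List Int := (3, 1, [5, 3, 2])

def Spec_min_max_distance (n : Int) (k : Int) (L : List Int) (out : List Int) : Prop :=
  out = min_max_distance_alt n k L
instance (n : Int) (k : Int) (L : List Int) (out : List Int) : Decidable (Spec_min_max_distance n k L out) := by
  unfold Spec_min_max_distance; infer_instance

-- ===== CLAIM (what is proved, stated in full; the proofs are below) =====
def Claim_equal_min_max_distance : Prop :=
  ∀ (n : Int) (k : Int) (L : List Int), Dom_min_max_distance n k L →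
    Pre_min_max_distance n k L → Spec_min_max_distance n k L (min_max_distance n k L)

-- ===== LEMMAS AND PROOFS =====

-- A's accumulator loop for can_place computes the sum B takes
theorem pvCan_eq (k d : Int) (L : List Int) : pvCanA k d L = pvCanB k d L := by
  unfold pvCanA pvCanB
  congr 1
  have h : ∀ (M : List Int) (c : Int),
      M.foldl (fun count length => count + PySem.Int.floordiv (length - 1) d) c
        = c + (M.map (fun length => PySem.Int.floordiv (length - 1) d)).sum := by
    intro M
    induction M with
    | nil => simp
    | cons x t ih => intro c; simp [List.foldl, ih]; ring
  simp [h]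

-- the two bisections take the same branches and agree
theorem pvLoop_eq (k : Int) (L : List Int) (left right : Int) :
    pvLoopA k L left right = pvBisectB k L left right := by
  fun_induction pvLoopA k L left right with
  | case1 l r h mid hcan ih =>
      rw [pvBisectB, dif_neg (show ¬ l ≥ r by omega)]
      show pvLoopA k L l mid = if pvCanB k mid L = true then pvBisectB k L l mid else pvBisectB k L (mid + 1) r
      rw [← pvCan_eq, if_pos hcan]
      exact ih
  | case2 l r h mid hcan ih =>
      rw [pvBisectB, dif_neg (show ¬ l ≥ r by omega)]
      show pvLoopA k L (mid + 1) r = if pvCanB k mid L = true then pvBisectB k L l mid else pvBisectB k L (mid + 1) r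
      rw [← pvCan_eq, if_neg hcan]
      exact ih
  | case3 l r h =>
      rw [pvBisectB, dif_pos (show l ≥ r by omega)]

-- appending a constant once per element of a list = appending a replicate block
theorem foldl_append_const {α : Type} (xs : List Int) (res : List α) (q : α) :
    xs.foldl (fun r _ => r ++ [q]) res = res ++ List.replicate xs.length q := by
  induction xs generalizing res with
  | nil => simp
  | cons x t ih =>
      rw [List.foldl_cons, ih, List.length_cons, List.replicate_succ]
      simp

-- A's per-length reconstruction step produces exactly B's chunk
theorem chunk_eq (left length : Int) (res : List Int) :
    (let parts := max 1 (PySem.Int.floordiv (length + left - 1) left)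
     let res' := (PySem.List.pyRange 0 (parts - 1) 1).foldl
        (fun r _ => r ++ [PySem.Int.floordiv length parts]) res
     res' ++ [length - (PySem.Int.floordiv length parts) * (parts - 1)])
      = res ++ pvChunkB left length := by
  simp only [pvChunkB]
  set parts := max 1 (PySem.Int.floordiv (length + left - 1) left) with hp
  have hparts : 1 ≤ parts := le_max_left _ _
  have hdm : PySem.Int.divmod? length parts
      = some (PySem.Int.floordiv length parts, PySem.Int.mod length parts) := by
    simp [PySem.Int.divmod?, PySem.Int.floordiv, PySem.Int.mod, show parts ≠ 0 by omega]
  rw [foldl_append_const, PySem.List.length_pyRange_one, hdm]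
  have hrep : PySem.List.pyRepeat [PySem.Int.floordiv length parts] (parts - 1)
      = List.replicate (parts - 1).toNat (PySem.Int.floordiv length parts) :=
    PySem.List.pyRepeat_singleton _ _
  have hmod := PySem.Int.floordiv_mul_add_mod length parts
  have hlast : length - (PySem.Int.floordiv length parts) * (parts - 1)
      = PySem.Int.floordiv length parts + PySem.Int.mod length parts := by
    nlinarith [hmod]
  rw [Option.getD_some]
  rw [show parts - 1 - 0 = parts - 1 by ring, hrep, hlast, List.append_assoc]

-- A's whole reconstruction loop is the concatenation of B's chunks
theorem foldl_chunks (left : Int) (M : List Int) (init : List Int) :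
    M.foldl (fun result length =>
        let parts := max 1 (PySem.Int.floordiv (length + left - 1) left)
        let result := (PySem.List.pyRange 0 (parts - 1) 1).foldl
          (fun r _ => r ++ [PySem.Int.floordiv length parts]) result
        result ++ [length - (PySem.Int.floordiv length parts) * (parts - 1)]) init
      = init ++ M.flatMap (pvChunkB left) := by
  induction M generalizing init with
  | nil => simp
  | cons x t ih =>
      rw [List.foldl_cons, chunk_eq, ih, List.flatMap_cons, List.append_assoc]

-- ===== VERDICT (by name: the statement is the Claim_ definition above) =====
theorem min_max_distance_spec : Claim_equal_min_max_distance := by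
  intro n k L _hdom _hpre
  unfold Spec_min_max_distance min_max_distance min_max_distance_alt
  show (L.foldl (fun result length =>
        let parts := max 1 (PySem.Int.floordiv (length + (pvLoopA k L 1 ((PySem.List.max? L (fun x => x)).getD 0)) - 1) (pvLoopA k L 1 ((PySem.List.max? L (fun x => x)).getD 0)))
        let result := (PySem.List.pyRange 0 (parts - 1) 1).foldl
          (fun r _ => r ++ [PySem.Int.floordiv length parts]) result
        result ++ [length - (PySem.Int.floordiv length parts) * (parts - 1)]) [])
      = L.flatMap (pvChunkB (pvBisectB k L 1 ((PySem.List.max? L (fun x => x)).getD 0)))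
  rw [pvLoop_eq, foldl_chunks, List.nil_append]
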